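-- pv_equiv track=rewrite | github.com/HindsboNikolaj/SCOPE | scope/eval/runner.py | scrape_final_answer
-- ===== SOURCE A (Python) =====
-- _DELIMS = ("Final Answer:", "Assistant:", "Tool", "===", "---")
--
-- def _is_delim(line: str) -> bool:
--     s = (line or "").strip()
--     return any(s.startswith(d) for d in _DELIMS)
--
-- def _clean_line(s: str) -> str:
--     return (s or "").rstrip()
--
-- def scrape_final_answer(log_lines):
--     """
--     Extract the final answer block:
--       1) Prefer the LAST 'Final Answer:' block, capturing subsequent lines
--          until the next delimiter.
--       2) Fallback to the LAST real 'Assistant:' block (skips '(tool call)').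
--     """
--     lines = []
--     for raw in (log_lines or []):
--         lines.extend(str(raw).splitlines())
--
--     # 1) LAST Final Answer block
--     for i in range(len(lines) - 1, -1, -1):
--         line = lines[i]
--         if "Final Answer:" in line:
--             head = line.split("Final Answer:", 1)[-1].strip()
--             block = [head] if head else []
--             j = i + 1
--             while j < len(lines) and not _is_delim(lines[j]):
--                 if lines[j].strip():
--                     block.append(_clean_line(lines[j]))
--                 j += 1
--             out = "\n".join(block).strip()
--             if out:
--                 return out
--
--     # 2) Fallback: LAST non-tool-call Assistant block
--     for i in range(len(lines) - 1, -1, -1):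
--         line = lines[i].strip()
--         if "Assistant:" in line:
--             content = line.split(":", 1)[-1].strip()
--             if not content or content.lower() == "(tool call)":
--                 continue
--             block = [content]
--             j = i + 1
--             while j < len(lines) and not _is_delim(lines[j]):
--                 if lines[j].strip():
--                     block.append(_clean_line(lines[j]))
--                 j += 1
--             out = "\n".join(block).strip()
--             if out:
--                 return out
--
--     return ""
-- ===== SOURCE B (Python) =====
-- # B: same backward candidate search, but the inner while-loop per candidate is
-- # replaced by a precomputed next-delimiter table + list slicing.
--
-- _DELIMS = ("Final Answer:", "Assistant:", "Tool", "===", "---")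
--
-- def _is_delim(line: str) -> bool:
--     s = (line or "").strip()
--     return any(s.startswith(d) for d in _DELIMS)
--
-- def _clean_line(s: str) -> str:
--     return (s or "").rstrip()
--
-- def scrape_final_answer(log_lines):
--     lines = []
--     for raw in (log_lines or []):
--         lines.extend(str(raw).splitlines())
--     n = len(lines)
--
--     # nd[k] = index of the nearest delimiter line at or after k (n if none)
--     nd = [n] * (n + 1)
--     for k in range(n - 1, -1, -1):
--         nd[k] = k if _is_delim(lines[k]) else nd[k + 1]
--
--     def render(heads, start):
--         body = [_clean_line(x) for x in lines[start:nd[start]] if x.strip()]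
--         return "\n".join(heads + body).strip()
--
--     for i in range(n - 1, -1, -1):
--         if "Final Answer:" in lines[i]:
--             head = lines[i].split("Final Answer:", 1)[-1].strip()
--             out = render([head] if head else [], i + 1)
--             if out:
--                 return out
--
--     for i in range(n - 1, -1, -1):
--         line = lines[i].strip()
--         if "Assistant:" in line:
--             content = line.split(":", 1)[-1].strip()
--             if not content or content.lower() == "(tool call)":
--                 continue
--             out = render([content], i + 1)
--             if out:
--                 return out
--
--     return ""
-- ===== Notes on version B (the rewrite author's own statement) =====
-- stated objective: alternative
-- what changed: The per-candidate inner while-loop that walks forward to the next delimiter is replaced by a single backward pass building a next-delimiter table, so each candidate block is obtained by one list slice plus a filtering comprehension.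
import Mathlib
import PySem

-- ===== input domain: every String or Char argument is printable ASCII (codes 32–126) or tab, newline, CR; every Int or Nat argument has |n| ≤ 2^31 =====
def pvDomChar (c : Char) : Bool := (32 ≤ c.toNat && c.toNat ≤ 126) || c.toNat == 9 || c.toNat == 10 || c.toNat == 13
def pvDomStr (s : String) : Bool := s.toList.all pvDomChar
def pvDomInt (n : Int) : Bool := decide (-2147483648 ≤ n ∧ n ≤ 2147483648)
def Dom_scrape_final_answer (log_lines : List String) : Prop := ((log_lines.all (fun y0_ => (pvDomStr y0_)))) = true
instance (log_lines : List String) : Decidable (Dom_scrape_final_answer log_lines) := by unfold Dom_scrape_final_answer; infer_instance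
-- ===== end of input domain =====

-- B replaces A's per-candidate inner while-loop by a precomputed next-delimiter
-- table plus a slice (objective: alternative decomposition, same cost).

-- ===== PORT A =====
-- _is_delim: any(s.startswith(d) for d in _DELIMS)
def pvIsDelim (line : String) : Bool :=
  let s := PySem.Str.strip line
  (["Final Answer:", "Assistant:", "Tool", "===", "---"]).any (fun d => PySem.Str.startswith s d)

-- _clean_line
def pvClean (s : String) : String := PySem.Str.rstrip s

-- lines built by extending with str(raw).splitlines()
def pvLinesOf (log_lines : List String) : List String :=
  log_lines.foldl (fun acc raw => acc ++ PySem.Str.splitlines raw) []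

-- the inner while loop of A: collect the lines appended to `block` from position j on
def pvBlockTailA : List String → List String
  | [] => []
  | l :: rs =>
      if pvIsDelim l then []
      else (if PySem.Str.strip l ≠ "" then [pvClean l] else []) ++ pvBlockTailA rs

-- line.split(sep, 1)[-1]
def pvSplitLast (line sep : String) : String :=
  (((PySem.Str.splitMax? line sep 1).getD []).getLastD "")

-- first backward loop: i counts down (argument is index+1); lines[i] is in range (i < len)
def pvLoop1 (lines : List String) : Nat → Option String
  | 0 => none
  | i + 1 =>
      let line := lines.getD i ""
      if PySem.Str.isIn "Final Answer:" line then
        let head := PySem.Str.strip (pvSplitLast line "Final Answer:")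
        let block := (if head ≠ "" then [head] else []) ++ pvBlockTailA (lines.drop (i + 1))
        let out := PySem.Str.strip (PySem.Str.join "\n" block)
        if out ≠ "" then some out else pvLoop1 lines i
      else pvLoop1 lines i

-- second backward loop (Assistant fallback)
def pvLoop2 (lines : List String) : Nat → Option String
  | 0 => none
  | i + 1 =>
      let line := PySem.Str.strip (lines.getD i "")
      if PySem.Str.isIn "Assistant:" line then
        let content := PySem.Str.strip (pvSplitLast line ":")
        if content = "" ∨ PySem.Str.lower content = "(tool call)" then pvLoop2 lines i
        else
          let block := [content] ++ pvBlockTailA (lines.drop (i + 1))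
          let out := PySem.Str.strip (PySem.Str.join "\n" block)
          if out ≠ "" then some out else pvLoop2 lines i
      else pvLoop2 lines i

def scrape_final_answer (log_lines : List String) : String :=
  let lines := pvLinesOf log_lines
  match pvLoop1 lines lines.length with
  | some s => s
  | none =>
      match pvLoop2 lines lines.length with
      | some s => s
      | none => ""

-- ===== PORT B =====
-- nd table built backwards: nd[k] = k if lines[k] is a delimiter else nd[k+1]; nd[n] = n
def pvNd (n : Nat) : Nat → List String → List Nat
  | _, [] => [n]
  | k, l :: rs =>
      let rest := pvNd n (k + 1) rs
      (if pvIsDelim l then k else rest.headD n) :: rest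

-- render(heads, start): heads + cleaned non-blank lines of lines[start:nd[start]]
def pvRender (lines : List String) (nd : List Nat) (heads : List String) (start : Nat) : String :=
  let body := ((PySem.List.slice lines (some (start : Int)) (some ((nd.getD start 0 : Nat) : Int))).filter
      (fun x => decide (PySem.Str.strip x ≠ ""))).map pvClean
  PySem.Str.strip (PySem.Str.join "\n" (heads ++ body))

def pvLoopB1 (lines : List String) (nd : List Nat) : Nat → Option String
  | 0 => none
  | i + 1 =>
      if PySem.Str.isIn "Final Answer:" (lines.getD i "") then
        let head := PySem.Str.strip (pvSplitLast (lines.getD i "") "Final Answer:")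
        let out := pvRender lines nd (if head ≠ "" then [head] else []) (i + 1)
        if out ≠ "" then some out else pvLoopB1 lines nd i
      else pvLoopB1 lines nd i

def pvLoopB2 (lines : List String) (nd : List Nat) : Nat → Option String
  | 0 => none
  | i + 1 =>
      let line := PySem.Str.strip (lines.getD i "")
      if PySem.Str.isIn "Assistant:" line then
        let content := PySem.Str.strip (pvSplitLast line ":")
        if content = "" ∨ PySem.Str.lower content = "(tool call)" then pvLoopB2 lines nd i
        else
          let out := pvRender lines nd [content] (i + 1)
          if out ≠ "" then some out else pvLoopB2 lines nd i
      else pvLoopB2 lines nd i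

def scrape_final_answer_alt (log_lines : List String) : String :=
  let lines := pvLinesOf log_lines
  let nd := pvNd lines.length 0 lines
  match pvLoopB1 lines nd lines.length with
  | some s => s
  | none =>
      match pvLoopB2 lines nd lines.length with
      | some s => s
      | none => ""

-- ===== PRECONDITION & SPEC =====
def Spec_scrape_final_answer (log_lines : List String) (out : String) : Prop := out = scrape_final_answer_alt log_lines
instance (log_lines : List String) (out : String) : Decidable (Spec_scrape_final_answer log_lines out) := by unfold Spec_scrape_final_answer; infer_instance

-- ===== CLAIM (what is proved, stated in full; the proofs are below) =====
def Claim_equal_scrape_final_answer : Prop := ∀ (log_lines : List String), Dom_scrape_final_answer log_lines → Spec_scrape_final_answer log_lines (scrape_final_answer log_lines)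

-- ===== LEMMAS AND PROOFS =====

-- A's inner while loop is filter∘map of the takeWhile-prefix
theorem pvBlockTailA_eq (rest : List String) :
    pvBlockTailA rest =
      ((rest.takeWhile (fun l => !pvIsDelim l)).filter
        (fun x => decide (PySem.Str.strip x ≠ ""))).map pvClean := by
  induction rest with
  | nil => rfl
  | cons l rs ih =>
      by_cases h : pvIsDelim l = true
      · simp [pvBlockTailA, h, List.takeWhile]
      · simp only [Bool.not_eq_true] at h
        by_cases hs : PySem.Str.strip l = ""
        · simp [pvBlockTailA, h, List.takeWhile, hs, ih]
        · simp [pvBlockTailA, h, List.takeWhile, hs, ih]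

-- the nd table points at the end of the takeWhile-prefix
theorem pvNd_getD : ∀ (rest : List String) (k m : Nat), m ≤ rest.length →
    (pvNd (k + rest.length) k rest).getD m 0 =
      k + m + ((rest.drop m).takeWhile (fun l => !pvIsDelim l)).length := by
  intro rest
  induction rest with
  | nil =>
      intro k m hm
      have hm0 : m = 0 := by simpa using hm
      subst hm0; simp [pvNd]
  | cons l rs ih =>
      intro k m hm
      match m with
      | 0 =>
          by_cases h : pvIsDelim l = true
          · simp [pvNd, h]
          · simp only [Bool.not_eq_true] at h
            have hrs := ih (k + 1) 0 (Nat.zero_le _)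
            have hhead : (pvNd (k + 1 + rs.length) (k + 1) rs).headD (k + 1 + rs.length) =
                (pvNd (k + 1 + rs.length) (k + 1) rs).getD 0 0 := by
              cases rs <;> simp [pvNd]
            simp only [pvNd, h, Bool.false_eq_true, if_false, List.length_cons,
              List.getD_cons_zero]
            rw [show k + (rs.length + 1) = k + 1 + rs.length by omega, hhead, hrs]
            simp [h]
            omega
      | Nat.succ m' =>
          simp only [List.length_cons] at hm
          have hrs := ih (k + 1) m' (by omega)
          simp only [pvNd, List.length_cons, List.getD_cons_succ, List.drop_succ_cons]
          rw [show k + (rs.length + 1) = k + 1 + rs.length by omega, hrs]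
          omega

-- hence the slice lines[j:nd[j]] IS the takeWhile-prefix of drop j
theorem pvSlice_nd (lines : List String) (j : Nat) (hj : j ≤ lines.length) :
    PySem.List.slice lines (some (j : Int))
        (some (((pvNd lines.length 0 lines).getD j 0 : Nat) : Int)) =
      (lines.drop j).takeWhile (fun l => !pvIsDelim l) := by
  have h := pvNd_getD lines 0 j hj
  simp only [Nat.zero_add] at h
  rw [h, PySem.List.slice_natCast]
  have : j + ((lines.drop j).takeWhile (fun l => !pvIsDelim l)).length - j
      = ((lines.drop j).takeWhile (fun l => !pvIsDelim l)).length := by omega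
  rw [this]
  exact (List.prefix_iff_eq_take.mp (List.takeWhile_prefix _)).symm

-- pvRender at an in-range start equals A's head ++ blockTail rendering
theorem pvRender_eq (lines : List String) (heads : List String) (j : Nat) (hj : j ≤ lines.length) :
    pvRender lines (pvNd lines.length 0 lines) heads j =
      PySem.Str.strip (PySem.Str.join "\n" (heads ++ pvBlockTailA (lines.drop j))) := by
  unfold pvRender
  rw [pvSlice_nd lines j hj, pvBlockTailA_eq]

theorem pvLoopB1_eq (lines : List String) :
    ∀ i, i ≤ lines.length →
      pvLoopB1 lines (pvNd lines.length 0 lines) i = pvLoop1 lines i := by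
  intro i
  induction i with
  | zero => intro _; rfl
  | succ i ih =>
      intro hi
      have hj : i + 1 ≤ lines.length := hi
      simp only [pvLoopB1, pvLoop1, pvRender_eq lines _ (i + 1) hj, ih (by omega)]

theorem pvLoopB2_eq (lines : List String) :
    ∀ i, i ≤ lines.length →
      pvLoopB2 lines (pvNd lines.length 0 lines) i = pvLoop2 lines i := by
  intro i
  induction i with
  | zero => intro _; rfl
  | succ i ih =>
      intro hi
      simp only [pvLoopB2, pvLoop2, pvRender_eq lines _ (i + 1) hi, ih (by omega)]

-- ===== VERDICT (by name: the statement is the Claim_ definition above) =====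
theorem scrape_final_answer_spec : Claim_equal_scrape_final_answer := by
  intro log_lines _
  unfold Spec_scrape_final_answer
  have h1 := pvLoopB1_eq (pvLinesOf log_lines) _ (le_refl (pvLinesOf log_lines).length)
  have h2 := pvLoopB2_eq (pvLinesOf log_lines) _ (le_refl (pvLinesOf log_lines).length)
  simp only [scrape_final_answer, scrape_final_answer_alt, h1, h2]
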